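-- pv_equiv track=rewrite | github.com/zaenaks/solutions_to_Olympia_problems | 19 - Degree of symmetry - Степінь симетрії.py | step
-- ===== SOURCE A (Python) =====
-- def step(N):
--     res = 0
--     if len(N) % 2 == 1:
--         res += 1
--     for i in range(len(N)//2):
--         if N[i] == N[i * (-1) - 1]:
--             res += 1
--     return res
-- ===== SOURCE B (Python) =====
-- def step(N):
--     rev = list(reversed(N))
--     m = sum(a == b for a, b in zip(N, rev))
--     return (m + len(N) % 2) // 2
-- ===== Notes on version B (the rewrite author's own statement) =====
-- stated objective: alternative
-- what changed: Instead of A's half-range loop over mirror indices with negative indexing, B compares the string with its full reversal position-by-position (sum over zip) and recovers the answer by the closed-form halving (m + len%2)//2, since each matching mirror pair is counted twice and an odd-length centre once.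
import Mathlib
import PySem

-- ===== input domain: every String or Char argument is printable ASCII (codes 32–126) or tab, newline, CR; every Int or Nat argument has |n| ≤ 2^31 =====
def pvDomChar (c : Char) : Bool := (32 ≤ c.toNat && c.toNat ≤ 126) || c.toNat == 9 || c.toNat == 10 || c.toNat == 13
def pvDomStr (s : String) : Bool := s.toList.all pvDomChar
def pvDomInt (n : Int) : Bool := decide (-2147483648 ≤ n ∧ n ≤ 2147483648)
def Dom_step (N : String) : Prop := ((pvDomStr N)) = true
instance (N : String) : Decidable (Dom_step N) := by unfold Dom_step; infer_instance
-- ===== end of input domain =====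

-- B replaces A's half-range mirror loop by a full comparison with the reversal plus a closed-form halving; same cost, different decomposition.

-- ===== PORT A =====
def step (N : String) : Int :=
  let l := N.toList
  let res : Int := if ((l.length : Int)) % 2 = 1 then 0 + 1 else 0
  (PySem.List.pyRange 0 (PySem.Int.floordiv (l.length : Int) 2) 1).foldl
    (fun res i =>
      if PySem.List.pyGet? l i = PySem.List.pyGet? l (i * (-1) - 1) then res + 1 else res)
    res

-- ===== PORT B =====
def step_alt (N : String) : Int :=
  let l := N.toList
  let rev := l.reverse
  let m : Int := ((l.zip rev).map (fun p => if p.1 = p.2 then (1 : Int) else 0)).sum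
  PySem.Int.floordiv (m + (l.length : Int) % 2) 2

-- ===== PRECONDITION & SPEC =====
def Spec_step (N : String) (out : Int) : Prop := out = step_alt N
instance (N : String) (out : Int) : Decidable (Spec_step N out) := by unfold Spec_step; infer_instance

-- ===== CLAIM (what is proved, stated in full; the proofs are below) =====
def Claim_equal_step : Prop := ∀ (N : String), Dom_step N → Spec_step N (step N)

-- ===== LEMMAS AND PROOFS =====

-- 1 if position k matches its mirror position, else 0 (via getElem?, total in k)
def mirror (l : List Char) (k : Nat) : Int :=
  if l[k]? = l[l.length - 1 - k]? then 1 else 0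

theorem mirror_symm (l : List Char) (k : Nat) (hk : k < l.length) :
    mirror l (l.length - 1 - k) = mirror l k := by
  unfold mirror
  have h : l.length - 1 - (l.length - 1 - k) = k := by omega
  rw [h]
  split_ifs with h1 h2 h2
  · rfl
  · exact absurd h1.symm h2
  · exact absurd h2.symm h1
  · rfl

theorem mirror_center (l : List Char) (h : l.length % 2 = 1) :
    mirror l (l.length / 2) = 1 := by
  unfold mirror
  have h2 : l.length - 1 - l.length / 2 = l.length / 2 := by omega
  rw [h2, if_pos rfl]

theorem sum_mirror (l : List Char) :
    ∑ k ∈ Finset.range l.length, mirror l k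
      = 2 * ∑ k ∈ Finset.range (l.length / 2), mirror l k + ((l.length % 2 : Nat) : Int) := by
  set n := l.length with hn
  have hsplit : ∑ k ∈ Finset.range n, mirror l k
      = ∑ k ∈ Finset.range (n / 2), mirror l k + ∑ k ∈ Finset.Ico (n / 2) n, mirror l k := by
    rw [Finset.range_eq_Ico, ← Finset.sum_Ico_consecutive (fun k => mirror l k)
      (Nat.zero_le (n / 2)) (Nat.div_le_self n 2), ← Finset.range_eq_Ico]
  have hupper : ∑ k ∈ Finset.Ico (n / 2) n, mirror l k
      = ∑ k ∈ Finset.range (n - n / 2), mirror l k := by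
    rw [Finset.range_eq_Ico]
    refine Finset.sum_nbij' (fun j => n - 1 - j) (fun k => n - 1 - k) ?_ ?_ ?_ ?_ ?_
    · intro a ha; simp only [Finset.mem_Ico] at *; omega
    · intro a ha; simp only [Finset.mem_Ico] at *; omega
    · intro a ha; simp only [Finset.mem_Ico] at ha; show n - 1 - (n - 1 - a) = a; omega
    · intro a ha; simp only [Finset.mem_Ico] at ha; show n - 1 - (n - 1 - a) = a; omega
    · intro a ha; simp only [Finset.mem_Ico] at ha
      exact (mirror_symm l a ha.2).symm
  rcases Nat.mod_two_eq_zero_or_one n with hpar | hpar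
  · have : n - n / 2 = n / 2 := by omega
    rw [hsplit, hupper, this, hpar]
    push_cast
    ring
  · have : n - n / 2 = n / 2 + 1 := by omega
    rw [hsplit, hupper, this, Finset.sum_range_succ, mirror_center l hpar, hpar]
    push_cast
    ring

theorem foldl_ite_sum (g : Nat → Prop) [DecidablePred g] (m : Nat) (init : Int) :
    (List.range m).foldl (fun acc k => if g k then acc + 1 else acc) init
      = init + ∑ k ∈ Finset.range m, (if g k then (1 : Int) else 0) := by
  induction m with
  | zero => simp
  | succ m ih =>
      rw [List.range_succ, List.foldl_append, ih, Finset.sum_range_succ, List.foldl_cons,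
        List.foldl_nil]
      split_ifs <;> ring

theorem stepA_eq (N : String) :
    step N = ((N.toList.length % 2 : Nat) : Int)
      + ∑ k ∈ Finset.range (N.toList.length / 2), mirror N.toList k := by
  unfold step
  dsimp only
  have l := N.toList
  clear l
  have hfd : PySem.Int.floordiv ((N.toList.length : Nat) : Int) 2 = ((N.toList.length / 2 : Nat) : Int) := by
    rw [PySem.Int.floordiv_eq_ediv_of_pos (by norm_num)]; omega
  have hres : (if ((N.toList.length : Nat) : Int) % 2 = 1 then (0 : Int) + 1 else 0)
      = ((N.toList.length % 2 : Nat) : Int) := by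
    split_ifs with h <;> omega
  rw [hfd, hres, PySem.List.pyRange_zero_nat, List.foldl_map]
  rw [foldl_ite_sum (fun k => PySem.List.pyGet? N.toList ((k : Nat) : Int)
    = PySem.List.pyGet? N.toList (((k : Nat) : Int) * (-1) - 1)) (N.toList.length / 2) _]
  congr 1
  refine Finset.sum_congr rfl ?_
  intro k hk
  rw [Finset.mem_range] at hk
  have hkn : k < N.toList.length := by omega
  have hneg : ((k : Nat) : Int) * (-1) - 1 = -(((k + 1 : Nat) : Int)) := by push_cast; ring
  rw [hneg, PySem.List.pyGet?_neg_natCast N.toList (k + 1) (by omega) (by omega),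
    PySem.List.pyGet?_natCast]
  unfold mirror
  have : N.toList.length - (k + 1) = N.toList.length - 1 - k := by omega
  rw [this]

theorem sum_map_eq_sum_range {α : Type} (g : α → Int) (z : List α) :
    (z.map g).sum = ∑ k ∈ Finset.range z.length, ((z[k]?.map g).getD 0) := by
  induction z with
  | nil => simp
  | cons a t ih =>
      rw [List.map_cons, List.sum_cons, ih, List.length_cons, Finset.sum_range_succ']
      simp [add_comm]

theorem stepB_eq (N : String) :
    step_alt N = PySem.Int.floordiv
      ((∑ k ∈ Finset.range N.toList.length, mirror N.toList k)
        + ((N.toList.length % 2 : Nat) : Int)) 2 := by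
  unfold step_alt
  dsimp only
  have hmod : ((N.toList.length : Nat) : Int) % 2 = ((N.toList.length % 2 : Nat) : Int) := by
    omega
  rw [hmod, sum_map_eq_sum_range]
  have hlen : (N.toList.zip N.toList.reverse).length = N.toList.length := by
    simp
  rw [hlen]
  congr 2
  refine Finset.sum_congr rfl ?_
  intro k hk
  rw [Finset.mem_range] at hk
  have h1 : N.toList.length - 1 - k < N.toList.length := by omega
  have hz : (N.toList.zip N.toList.reverse)[k]?
      = some (N.toList[k], N.toList[N.toList.length - 1 - k]) := by
    have hk' : k < (N.toList.zip N.toList.reverse).length := by rw [hlen]; exact hk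
    rw [List.getElem?_eq_getElem hk', List.getElem_zip]
    have : N.toList.reverse[k]'(by simpa using hk) = N.toList[N.toList.length - 1 - k] := by
      rw [List.getElem_reverse]
    simp [this]
  rw [hz]
  unfold mirror
  rw [List.getElem?_eq_getElem hk, List.getElem?_eq_getElem h1]
  simp

-- ===== VERDICT (by name: the statement is the Claim_ definition above) =====
theorem step_spec : Claim_equal_step := by
  intro N _
  unfold Spec_step
  rw [stepA_eq, stepB_eq, sum_mirror]
  rw [PySem.Int.floordiv_eq_ediv_of_pos (by norm_num)]
  set P := ∑ k ∈ Finset.range (N.toList.length / 2), mirror N.toList k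
  set r := ((N.toList.length % 2 : Nat) : Int)
  have : 2 * P + r + r = 2 * (P + r) := by ring
  rw [this, Int.mul_ediv_cancel_left _ (by norm_num)]
  ring
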